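-- pv_equiv track=rewrite | github.com/gottino/remarkable-integration | src/processors/pdf_text_matcher.py | _word_positions_to_char_positions
-- ===== SOURCE A (Python) =====
-- from typing import Optional, Tuple, List
--
-- def _word_positions_to_char_positions(text: str, start_word: int, end_word: int) -> Tuple[int, int]:
--     """
--     Convert word positions to character positions in the original text.
--
--     Args:
--         text: Original text
--         start_word: Starting word index
--         end_word: Ending word index (exclusive)
--
--     Returns:
--         Tuple of (start_char_pos, end_char_pos)
--     """
--     words = text.split()
--     if start_word >= len(words):
--         return (0, 0)
--
--     end_word = min(end_word, len(words))
--
--     # Find character position of start word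
--     char_pos = 0
--     for i, word in enumerate(words):
--         if i == start_word:
--             start_char = char_pos
--             break
--         char_pos = text.find(word, char_pos) + len(word)
--     else:
--         start_char = 0
--
--     # Find character position after end word
--     if end_word >= len(words):
--         end_char = len(text)
--     else:
--         char_pos = start_char
--         for i in range(start_word, end_word):
--             if i >= len(words):
--                 break
--             char_pos = text.find(words[i], char_pos) + len(words[i])
--         end_char = char_pos
--
--     return (start_char, end_char)
-- ===== SOURCE B (Python) =====
-- def _word_positions_to_char_positions(text: str, start_word: int, end_word: int):
--     """Single pass: tabulate the char position after each word once, then read the answer off."""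
--     words = text.split()
--     n = len(words)
--     if start_word >= n:
--         return (0, 0)
--     ends = []
--     cursor = 0
--     for w in words:
--         cursor = text.find(w, cursor) + len(w)
--         ends.append(cursor)
--     start_char = ends[start_word - 1] if start_word > 0 else 0
--     if end_word >= n:
--         end_char = len(text)
--     elif end_word > start_word:
--         end_char = ends[end_word - 1]
--     else:
--         end_char = start_char
--     return (start_char, end_char)
-- ===== Notes on version B (the rewrite author's own statement) =====
-- stated objective: alternative
-- what changed: B builds the table of after-each-word char positions in one pass over the words and reads start/end off it, instead of A's two separate cursor loops (one scanning words up to start_word, one re-scanning the start..end range).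
-- outside the precondition, e.g. on _word_positions_to_char_positions('a b', -1, 1): A returns (0, 0), B returns (0, 1); on _word_positions_to_char_positions('a a', -1, 1): A returns (0, 3), B returns (0, 1); on _word_positions_to_char_positions('a b', -5, 1): A raises IndexError, B returns (0, 1)
import Mathlib
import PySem

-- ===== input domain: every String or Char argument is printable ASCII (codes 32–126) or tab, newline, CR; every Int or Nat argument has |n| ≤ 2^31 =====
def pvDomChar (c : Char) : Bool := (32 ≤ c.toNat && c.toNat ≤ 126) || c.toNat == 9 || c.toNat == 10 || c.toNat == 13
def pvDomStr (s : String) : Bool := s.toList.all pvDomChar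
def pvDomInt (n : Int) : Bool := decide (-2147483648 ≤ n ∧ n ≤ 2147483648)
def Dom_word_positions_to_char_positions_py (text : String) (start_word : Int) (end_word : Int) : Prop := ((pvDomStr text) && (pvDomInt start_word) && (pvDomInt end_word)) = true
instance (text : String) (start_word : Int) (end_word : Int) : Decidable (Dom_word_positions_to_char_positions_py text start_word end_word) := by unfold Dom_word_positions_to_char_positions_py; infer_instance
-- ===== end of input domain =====

-- B tabulates the char position after each word in one pass and reads the answer off,
-- instead of A's two separate cursor loops; same cost (objective: alternative).

-- ===== PORT A =====
-- first loop: 'for i, word in enumerate(words): if i == start_word: start_char = char_pos; break; char_pos = ...' with for-else 'start_char = 0'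
def wppA_startLoop (text : String) (start_word : Int) : List String → Int → Int → Int
  | [], _, _ => 0
  | w :: ws, i, char_pos =>
    if i = start_word then char_pos
    else wppA_startLoop text start_word ws (i + 1)
      (PySem.Str.findFrom text w char_pos none + PySem.Str.len w)

-- second loop: 'for i in range(start_word, end_word): if i >= len(words): break; char_pos = ...'
def wppA_endLoop (text : String) (words : List String) : List Int → Int → Int
  | [], char_pos => char_pos
  | i :: is, char_pos =>
    if i ≥ PySem.List.len words then char_pos
    else
      match PySem.List.pyGet? words i with
      | some w => wppA_endLoop text words is (PySem.Str.findFrom text w char_pos none + PySem.Str.len w)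
      | none => char_pos   -- Python raises IndexError here; such inputs are excluded by Pre_

def word_positions_to_char_positions_py (text : String) (start_word : Int) (end_word : Int) : Int × Int :=
  let words := PySem.Str.split₀ text
  if start_word ≥ PySem.List.len words then (0, 0)
  else
    let end_word' := min end_word (PySem.List.len words)
    let start_char := wppA_startLoop text start_word words 0 0
    let end_char :=
      if end_word' ≥ PySem.List.len words then PySem.Str.len text
      else wppA_endLoop text words (PySem.List.pyRange start_word end_word' 1) start_char
    (start_char, end_char)

-- ===== PORT B =====
def word_positions_to_char_positions_py_alt (text : String) (start_word : Int) (end_word : Int) : Int × Int :=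
  let words := PySem.Str.split₀ text
  let n := PySem.List.len words
  if start_word ≥ n then (0, 0)
  else
    let ends := (words.foldl (fun (acc : List Int × Int) w =>
        let c := PySem.Str.findFrom text w acc.2 none + PySem.Str.len w
        (acc.1 ++ [c], c)) ([], 0)).1
    let start_char := if start_word > 0 then PySem.List.pyGetD ends (start_word - 1) 0 else 0
    let end_char :=
      if end_word ≥ n then PySem.Str.len text
      else if end_word > start_word then PySem.List.pyGetD ends (end_word - 1) 0
      else start_char
    (start_char, end_char)

-- ===== PRECONDITION & SPEC =====
-- Pre_ excludes negative start_word with a nonempty word range ending before the word count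
-- (start_word < 0 ∧ start_word < end_word < len(words)): there A raises IndexError when
-- start_word < -len(words), and otherwise rescans words selected by Python negative-index
-- wraparound from cursor 0 — an accident of its loop no caller would specify; B reads its
-- table (also with Python indexing), and the two coincide only by chance on such inputs.
def Pre_word_positions_to_char_positions_py (text : String) (start_word : Int) (end_word : Int) : Prop :=
  ¬ (start_word < 0 ∧ start_word < end_word ∧ end_word < PySem.List.len (PySem.Str.split₀ text))
instance (text : String) (start_word : Int) (end_word : Int) : Decidable (Pre_word_positions_to_char_positions_py text start_word end_word) := by unfold Pre_word_positions_to_char_positions_py; infer_instance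

def pvWitness_word_positions_to_char_positions_py : String × Int × Int := ("hello world", 0, 1)

def Spec_word_positions_to_char_positions_py (text : String) (start_word : Int) (end_word : Int) (out : Int × Int) : Prop := out = word_positions_to_char_positions_py_alt text start_word end_word
instance (text : String) (start_word : Int) (end_word : Int) (out : Int × Int) : Decidable (Spec_word_positions_to_char_positions_py text start_word end_word out) := by unfold Spec_word_positions_to_char_positions_py; infer_instance

-- ===== CLAIM (what is proved, stated in full; the proofs are below) =====
def Claim_equal_word_positions_to_char_positions_py : Prop := ∀ (text : String) (start_word : Int) (end_word : Int), Dom_word_positions_to_char_positions_py text start_word end_word → Pre_word_positions_to_char_positions_py text start_word end_word → Spec_word_positions_to_char_positions_py text start_word end_word (word_positions_to_char_positions_py text start_word end_word)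

-- ===== LEMMAS AND PROOFS =====

-- cursor positions after each word, starting the scan at cursor c
def wppEnds (text : String) (c : Int) : List String → List Int
  | [] => []
  | w :: ws =>
    let c' := PySem.Str.findFrom text w c none + PySem.Str.len w
    c' :: wppEnds text c' ws

theorem wppEnds_length (text : String) (c : Int) (ws : List String) :
    (wppEnds text c ws).length = ws.length := by
  induction ws generalizing c with
  | nil => rfl
  | cons w ws ih => simp [wppEnds, ih]

-- B's fold builds exactly wppEnds
theorem wppB_fold_eq (text : String) (ws : List String) (acc : List Int) (c : Int) :
    (ws.foldl (fun (acc : List Int × Int) w =>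
        let c := PySem.Str.findFrom text w acc.2 none + PySem.Str.len w
        (acc.1 ++ [c], c)) (acc, c)).1 = acc ++ wppEnds text c ws := by
  induction ws generalizing acc c with
  | nil => simp [wppEnds]
  | cons w ws ih =>
    have h := ih (acc ++ [PySem.Str.findFrom text w c none + PySem.Str.len w])
      (PySem.Str.findFrom text w c none + PySem.Str.len w)
    rw [List.foldl_cons]
    simpa [wppEnds] using h

-- the chain relation: entry k+1 is obtained from entry k by one find step
theorem wppEnds_getD_succ (text : String) (ws : List String) (c : Int) (k : Nat)
    (hk : k < ws.length) :
    (c :: wppEnds text c ws).getD (k + 1) 0 =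
      PySem.Str.findFrom text (ws.getD k "") ((c :: wppEnds text c ws).getD k 0) none
        + PySem.Str.len (ws.getD k "") := by
  induction ws generalizing c k with
  | nil => simp at hk
  | cons w ws ih =>
    cases k with
    | zero => simp [wppEnds]
    | succ k =>
      simp only [wppEnds, List.getD_cons_succ, List.length_cons] at *
      exact ih _ k (by omega)

-- A's first loop lands on the table entry of start_word
theorem wppA_startLoop_eq (text : String) (ws : List String) (i c : Int) (k : Nat)
    (hk : k < ws.length) :
    wppA_startLoop text (i + k) ws i c = (c :: wppEnds text c ws).getD k 0 := by
  induction ws generalizing i c k with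
  | nil => simp at hk
  | cons w ws ih =>
    cases k with
    | zero => simp [wppA_startLoop]
    | succ k =>
      rw [wppA_startLoop]
      have hne : ¬ (i = i + (((k + 1 : Nat)) : Int)) := by push_cast; omega
      rw [if_neg hne]
      simp only [wppEnds, List.getD_cons_succ]
      have harg : i + ((k + 1 : Nat) : Int) = (i + 1) + (k : Nat) := by push_cast; ring
      rw [harg]
      exact ih (i + 1) _ k (by simpa using hk)

theorem wppA_startLoop_lt (text : String) (sw : Int) (ws : List String) (i c : Int)
    (h : sw < i) : wppA_startLoop text sw ws i c = 0 := by
  induction ws generalizing i c with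
  | nil => rfl
  | cons w ws ih =>
    rw [wppA_startLoop]
    have hne : ¬ (i = sw) := by omega
    simp only [hne, if_false]
    exact ih (i + 1) _ (by omega)

-- A's second loop walks the table from entry a to entry b
theorem wppA_endLoop_eq (text : String) (ws : List String) (a b : Int)
    (ha : 0 ≤ a) (hab : a ≤ b) (hb : b ≤ ws.length) :
    wppA_endLoop text ws (PySem.List.pyRange a b 1)
      ((0 :: wppEnds text 0 ws).getD a.toNat 0) =
    (0 :: wppEnds text 0 ws).getD b.toNat 0 := by
  generalize hN : (b - a).toNat = N
  induction N generalizing a with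
  | zero =>
    have hba : b = a := by omega
    rw [hba, PySem.List.pyRange_one_eq_nil (le_refl a), wppA_endLoop]
  | succ N ih =>
    have hlt : a < b := by omega
    rw [PySem.List.pyRange_one_cons hlt, wppA_endLoop]
    have hlen : ¬ (a ≥ PySem.List.len ws) := by
      simp only [PySem.List.len_eq]; omega
    simp only [hlen, if_false]
    have hrange : a.toNat < ws.length := by omega
    rw [PySem.List.pyGet?_eq_some_getElem ws ha (by omega)]
    dsimp only
    have hgd : ws.getD a.toNat "" = ws[a.toNat] := List.getD_eq_getElem ws "" hrange
    have hstep := wppEnds_getD_succ text ws 0 a.toNat hrange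
    rw [hgd] at hstep
    rw [← hstep]
    have h1 : (a + 1).toNat = a.toNat + 1 := by omega
    have := ih (a + 1) (by omega) (by omega) (by omega)
    rw [h1] at this
    exact this

-- ===== VERDICT (by name: the statement is the Claim_ definition above) =====
theorem word_positions_to_char_positions_py_spec : Claim_equal_word_positions_to_char_positions_py := by
  intro text sw ew _ hPre
  unfold Pre_word_positions_to_char_positions_py at hPre
  unfold Spec_word_positions_to_char_positions_py
  unfold word_positions_to_char_positions_py word_positions_to_char_positions_py_alt
  dsimp only
  simp only [PySem.List.len_eq] at hPre ⊢
  set words := PySem.Str.split₀ text with hwords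
  set wc : Nat := words.length with hwc
  by_cases hge : sw ≥ (wc : Int)
  · rw [if_pos hge, if_pos hge]
  · rw [if_neg hge, if_neg hge]
    rw [wppB_fold_eq text words [] 0]
    simp only [List.nil_append]
    set ends := wppEnds text 0 words with hends
    have hlen : ends.length = wc := wppEnds_length text 0 words
    by_cases hsw0 : 0 ≤ sw
    · -- start_word in [0, wc)
      have hk : sw.toNat < wc := by omega
      have hstart : wppA_startLoop text sw words 0 0 = (0 :: ends).getD sw.toNat 0 := by
        have h := wppA_startLoop_eq text words 0 0 sw.toNat hk
        rw [show (0 : Int) + (sw.toNat : Nat) = sw from by omega] at h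
        exact h
      have hstartB : (if sw > 0 then PySem.List.pyGetD ends (sw - 1) 0 else 0)
          = (0 :: ends).getD sw.toNat 0 := by
        by_cases h0 : sw > 0
        · have h1 : (0:Int) ≤ sw - 1 := by omega
          have h2 : sw - 1 < (ends.length : Int) := by omega
          rw [if_pos h0, PySem.List.pyGetD_eq_getElem ends 0 h1 h2]
          have hsn : sw.toNat = (sw - 1).toNat + 1 := by omega
          rw [hsn, List.getD_cons_succ]
          exact (List.getD_eq_getElem ends 0 (show (sw - 1).toNat < ends.length from by omega)).symm
        · have hz : sw = 0 := by omega
          simp [hz]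
      rw [hstart, hstartB]
      by_cases hew : ew ≥ (wc : Int)
      · have hmin : min ew (wc : Int) = (wc : Int) := by omega
        rw [hmin, if_pos (le_refl _), if_pos hew]
      · have hmin : min ew (wc : Int) = ew := by omega
        rw [hmin, if_neg hew, if_neg hew]
        by_cases hgt : ew > sw
        · rw [if_pos hgt]
          have hA := wppA_endLoop_eq text words sw ew hsw0 (by omega) (by omega)
          rw [hA]
          have h1 : (0:Int) ≤ ew - 1 := by omega
          have h2 : ew - 1 < (ends.length : Int) := by omega
          rw [PySem.List.pyGetD_eq_getElem ends 0 h1 h2]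
          have hen : ew.toNat = (ew - 1).toNat + 1 := by omega
          rw [hen, List.getD_cons_succ]
          rw [← hends, List.getD_eq_getElem ends 0 (show (ew - 1).toNat < ends.length from by omega)]
        · rw [if_neg hgt, PySem.List.pyRange_one_eq_nil (by omega), wppA_endLoop]
    · -- start_word < 0: Pre_ forces ew ≤ sw or ew ≥ wc
      have hswlt : sw < 0 := by omega
      have hstart : wppA_startLoop text sw words 0 0 = 0 :=
        wppA_startLoop_lt text sw words 0 0 hswlt
      rw [hstart, if_neg (show ¬ (sw > 0) from by omega)]
      by_cases hew : ew ≥ (wc : Int)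
      · have hmin : min ew (wc : Int) = (wc : Int) := by omega
        rw [hmin, if_pos (le_refl _), if_pos hew]
      · have hewsw : ew ≤ sw := by
          by_contra hc
          exact hPre ⟨hswlt, by omega, by omega⟩
        have hmin : min ew (wc : Int) = ew := by omega
        rw [hmin, if_neg hew, if_neg hew, if_neg (show ¬ (ew > sw) from by omega)]
        rw [PySem.List.pyRange_one_eq_nil (by omega), wppA_endLoop]
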